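-- pv_equiv track=rewrite | github.com/naveed25194-cpu/my-first-project | bruteforce.py | findMaxWithCount
-- ===== SOURCE A (Python) =====
-- def findMaxWithCount(E):
--     """Find max and count comparisons"""
--     comparisons = 0
--     max_val = E[0]
--
--     for i in range(1, len(E)):
--         comparisons += 1  # Count this comparison
--         if max_val < E[i]:
--             max_val = E[i]
--
--     return max_val, comparisons
-- ===== SOURCE B (Python) =====
-- def findMaxWithCount(E):
--     """Find max and count comparisons"""
--     # The loop always performs exactly len(E)-1 comparisons, so the count
--     # is a closed form; builtin max (first of equal maxima) matches the
--     # strict '<' update of the original.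
--     return max(E), len(E) - 1
-- ===== Notes on version B (the rewrite author's own statement) =====
-- stated objective: simpler
-- what changed: Replaces the counting loop with the closed form len(E)-1 and the hand-rolled max loop with builtin max (C-level scan), since the comparison count is structurally fixed regardless of values.
-- outside the precondition, e.g. on findMaxWithCount([]): A raises IndexError, B raises ValueError
import Mathlib
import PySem

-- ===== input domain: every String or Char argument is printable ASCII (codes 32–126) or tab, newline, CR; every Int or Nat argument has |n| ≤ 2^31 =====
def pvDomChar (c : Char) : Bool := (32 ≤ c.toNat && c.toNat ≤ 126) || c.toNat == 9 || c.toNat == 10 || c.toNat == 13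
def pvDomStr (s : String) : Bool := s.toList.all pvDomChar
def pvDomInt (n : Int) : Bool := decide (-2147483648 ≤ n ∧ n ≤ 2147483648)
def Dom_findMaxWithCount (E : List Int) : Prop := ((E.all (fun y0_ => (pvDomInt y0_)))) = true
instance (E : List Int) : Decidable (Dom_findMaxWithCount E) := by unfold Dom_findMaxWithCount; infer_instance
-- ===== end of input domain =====

-- B replaces A's counting loop by the closed form len(E)-1 and the hand-rolled
-- max loop by builtin max (simpler, same cost); equivalence is about the return value.

-- ===== PORT A =====
def findMaxWithCount (E : List Int) : Int × Int :=
  let comparisons : Int := 0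
  let max_val : Int := PySem.List.pyGetD E 0 0          -- E[0]; total under Pre_ (E ≠ [])
  let st := (PySem.List.pyRange 1 (E.length : Int) 1).foldl
    (fun (st : Int × Int) i =>
      let c := st.2 + 1
      let m := if st.1 < PySem.List.pyGetD E i 0 then PySem.List.pyGetD E i 0 else st.1
      (m, c)) (max_val, comparisons)
  (st.1, st.2)

-- ===== PORT B =====
def findMaxWithCount_alt (E : List Int) : Int × Int :=
  ((PySem.List.max? E (fun y => y)).getD 0, (E.length : Int) - 1)   -- max(E); total under Pre_ (E ≠ [])

-- ===== PRECONDITION & SPEC =====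
-- Pre_ excludes only the empty list, on which A raises IndexError (and B raises ValueError).
def Pre_findMaxWithCount (E : List Int) : Prop := E ≠ []
instance (E : List Int) : Decidable (Pre_findMaxWithCount E) := by unfold Pre_findMaxWithCount; infer_instance
def pvWitness_findMaxWithCount : List Int := [3, 1, 3, 2]

def Spec_findMaxWithCount (E : List Int) (out : Int × Int) : Prop := out = findMaxWithCount_alt E
instance (E : List Int) (out : Int × Int) : Decidable (Spec_findMaxWithCount E out) := by unfold Spec_findMaxWithCount; infer_instance

-- ===== CLAIM (what is proved, stated in full; the proofs are below) =====
def Claim_equal_findMaxWithCount : Prop := ∀ (E : List Int), Dom_findMaxWithCount E → Pre_findMaxWithCount E → Spec_findMaxWithCount E (findMaxWithCount E)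

-- ===== LEMMAS AND PROOFS =====

-- A's loop body as a pair fold: the max component is the running max and the
-- count component just adds the length.
lemma pairFold_eq (t : List Int) (x c : Int) :
    t.foldl (fun (st : Int × Int) v =>
      (if st.1 < v then v else st.1, st.2 + 1)) (x, c)
      = (t.foldl max x, c + t.length) := by
  induction t generalizing x c with
  | nil => simp
  | cons y t ih =>
      simp only [List.foldl_cons, List.length_cons]
      rw [ih]
      have hm : (if x < y then y else x) = max x y := by
        by_cases h : x < y <;> simp [h, max_def] <;> omega
      rw [hm]
      have : (c + 1 + (t.length : Int)) = c + ((t.length + 1 : Nat) : Int) := by push_cast; ring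
      rw [this]

-- ===== VERDICT (by name: the statement is the Claim_ definition above) =====
theorem findMaxWithCount_spec : Claim_equal_findMaxWithCount := by
  intro E _ hpre
  obtain ⟨x, t, rfl⟩ : ∃ x t, E = x :: t := by
    cases E with
    | nil => exact absurd rfl hpre
    | cons x t => exact ⟨x, t, rfl⟩
  unfold Spec_findMaxWithCount findMaxWithCount findMaxWithCount_alt
  have hfold := PySem.List.foldl_pyRange_pyGetD (xs := x :: t) (a := 1)
    (d := 0)
    (f := fun (st : Int × Int) v =>
      (if st.1 < v then v else st.1, st.2 + 1))
    (init := (PySem.List.pyGetD (x :: t) 0 0, (0 : Int)))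
    (by norm_num)
  simp only [PySem.List.len_eq] at hfold
  dsimp only
  rw [hfold]
  norm_num [List.drop_succ_cons]
  rw [pairFold_eq, PySem.List.max?_id_cons]
  simp
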